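-- pv_equiv track=rewrite | github.com/Ditoo29/21-22 | FP/LABS/LAB09/9_1.py | apenas_digitos_impares
-- ===== SOURCE A (Python) =====
-- def apenas_digitos_impares(n):
--     if n == 0:
--         return 0
--     d = n % 10
--     if d % 2 == 0:
--         return apenas_digitos_impares(n // 10)
--     else:
--         return apenas_digitos_impares(n // 10) * 10 + d
-- ===== SOURCE B (Python) =====
-- def apenas_digitos_impares(n):
--     # Stage 1: extract the digits of n, least-significant first.
--     digits = []
--     while n != 0:
--         digits.append(n % 10)
--         n //= 10
--     # Stage 2: keep only the odd digits.
--     odd = [d for d in digits if d % 2 != 0]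
--     # Stage 3: reassemble, most-significant digit first.
--     result = 0
--     for d in reversed(odd):
--         result = result * 10 + d
--     return result
-- ===== Notes on version B (the rewrite author's own statement) =====
-- stated objective: alternative
-- what changed: Replaced A's single recursion by three staged passes: extract the digit list, filter it for odd digits, then fold the filtered digits back into a number.
import Mathlib
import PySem

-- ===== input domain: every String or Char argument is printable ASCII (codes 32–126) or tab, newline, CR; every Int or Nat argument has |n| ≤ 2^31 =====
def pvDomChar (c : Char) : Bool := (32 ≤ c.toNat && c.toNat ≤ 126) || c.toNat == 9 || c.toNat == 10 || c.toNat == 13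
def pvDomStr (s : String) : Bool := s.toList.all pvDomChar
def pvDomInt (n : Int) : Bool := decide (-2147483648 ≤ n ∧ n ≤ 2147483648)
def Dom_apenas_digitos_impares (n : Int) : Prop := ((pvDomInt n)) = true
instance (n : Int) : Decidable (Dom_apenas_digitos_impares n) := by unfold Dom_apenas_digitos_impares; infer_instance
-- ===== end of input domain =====

-- B replaces A's recursion by three staged passes (extract digits, filter odd, fold back);
-- return-value equivalence only, proved on n ≥ 0 (both Pythons diverge for n < 0).

-- ===== PORT A =====
-- literal recursion of A; the n < 0 branch only makes the port total (Python diverges there)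
def apenas_digitos_impares (n : Int) : Int :=
  if _h : n ≤ 0 then 0
  else
    if PySem.Int.mod (PySem.Int.mod n 10) 2 = 0 then apenas_digitos_impares (PySem.Int.floordiv n 10)
    else apenas_digitos_impares (PySem.Int.floordiv n 10) * 10 + PySem.Int.mod n 10
termination_by n.toNat
decreasing_by
  all_goals
    have h10 : (0:Int) < 10 := by norm_num
    rw [PySem.Int.floordiv_eq_ediv_of_pos h10]
    omega

-- ===== PORT B =====
-- stage 1 of Source B: the digit-extraction while loop, least-significant digit first
def apenasDigits (n : Int) : List Int :=
  if _h : n ≤ 0 then []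
  else PySem.Int.mod n 10 :: apenasDigits (PySem.Int.floordiv n 10)
termination_by n.toNat
decreasing_by
  have h10 : (0:Int) < 10 := by norm_num
  rw [PySem.Int.floordiv_eq_ediv_of_pos h10]
  omega

-- stages 2 and 3 of Source B: filter for odd digits, then fold back-to-front into a number
def apenas_digitos_impares_alt (n : Int) : Int :=
  (((apenasDigits n).filter (fun d => PySem.Int.mod d 2 != 0)).reverse).foldl
    (fun r d => r * 10 + d) 0

-- ===== PRECONDITION & SPEC =====
-- Pre_ excludes n < 0: there Python A recurses forever (RecursionError) and B's first loop spins forever.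
def Pre_apenas_digitos_impares (n : Int) : Prop := 0 ≤ n
instance (n : Int) : Decidable (Pre_apenas_digitos_impares n) := by unfold Pre_apenas_digitos_impares; infer_instance
def pvWitness_apenas_digitos_impares : Int := 135

def Spec_apenas_digitos_impares (n : Int) (out : Int) : Prop := out = apenas_digitos_impares_alt n
instance (n : Int) (out : Int) : Decidable (Spec_apenas_digitos_impares n out) := by unfold Spec_apenas_digitos_impares; infer_instance

-- ===== CLAIM (what is proved, stated in full; the proofs are below) =====
def Claim_equal_apenas_digitos_impares : Prop := ∀ (n : Int), Dom_apenas_digitos_impares n → Pre_apenas_digitos_impares n → Spec_apenas_digitos_impares n (apenas_digitos_impares n)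

-- ===== LEMMAS AND PROOFS =====

theorem apenas_eq (n : Int) :
    apenas_digitos_impares n =
      (((apenasDigits n).filter (fun d => PySem.Int.mod d 2 != 0)).reverse).foldl
        (fun r d => r * 10 + d) 0 := by
  by_cases h : n ≤ 0
  · rw [apenas_digitos_impares, apenasDigits]; simp [h]
  · have h10 : (0:Int) < 10 := by norm_num
    have hlt : (PySem.Int.floordiv n 10).toNat < n.toNat := by
      rw [PySem.Int.floordiv_eq_ediv_of_pos h10]; omega
    have ih := apenas_eq (PySem.Int.floordiv n 10)
    rw [apenas_digitos_impares, apenasDigits, dif_neg h, dif_neg h]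
    by_cases hd : PySem.Int.mod (PySem.Int.mod n 10) 2 = 0
    · have hb : ((PySem.Int.mod (PySem.Int.mod n 10) 2 != 0) = false) := by simpa using hd
      rw [if_pos hd, ih, List.filter_cons, hb]
      simp only [Bool.false_eq_true, if_false]
    · have hb : ((PySem.Int.mod (PySem.Int.mod n 10) 2 != 0) = true) := by simpa using hd
      rw [if_neg hd, ih, List.filter_cons, hb]
      simp only [if_true, List.reverse_cons, List.foldl_append, List.foldl_cons, List.foldl_nil]
termination_by n.toNat

-- ===== VERDICT (by name: the statement is the Claim_ definition above) =====
theorem apenas_digitos_impares_spec : Claim_equal_apenas_digitos_impares := by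
  intro n _ _
  unfold Spec_apenas_digitos_impares apenas_digitos_impares_alt
  exact apenas_eq n
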